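-- pv_equiv track=rewrite | github.com/Georgmel4757/40-Exercises | Chapter 4/ex-10.py | sumsUp
-- ===== SOURCE A (Python) =====
-- def sumsUp(nums):
--     result=[]
--
--     if not nums:
--         return None
--
--     for i in range(len(nums)):
--         for j in range(i, len(nums)):
--             if nums[i] == nums[j]:
--                 continue
--             if (nums[i] + nums[j] == 8 and
--                     sorted([nums[i], nums[j]]) not in result):
--                 result.append(sorted([nums[i], nums[j]]))
--
--     return result
-- ===== SOURCE B (Python) =====
-- def sumsUp(nums):
--     if not nums:
--         return None
--     values = set(nums)
--     seen = set()
--     out = []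
--     for v in nums:
--         if v not in seen:
--             w = 8 - v
--             if w != v and w in values and w not in seen:
--                 out.append([v, w] if v < w else [w, v])
--             seen.add(v)
--     return out
-- ===== Notes on version B (the rewrite author's own statement) =====
-- stated objective: faster
-- what changed: Replaced the O(n^3) nested index loops with list-membership dedup by a single pass over the list using a seen-set and a whole-list value set: each first occurrence checks its unique complement 8-v, which yields exactly A's pairs in A's discovery order.
import Mathlib
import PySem

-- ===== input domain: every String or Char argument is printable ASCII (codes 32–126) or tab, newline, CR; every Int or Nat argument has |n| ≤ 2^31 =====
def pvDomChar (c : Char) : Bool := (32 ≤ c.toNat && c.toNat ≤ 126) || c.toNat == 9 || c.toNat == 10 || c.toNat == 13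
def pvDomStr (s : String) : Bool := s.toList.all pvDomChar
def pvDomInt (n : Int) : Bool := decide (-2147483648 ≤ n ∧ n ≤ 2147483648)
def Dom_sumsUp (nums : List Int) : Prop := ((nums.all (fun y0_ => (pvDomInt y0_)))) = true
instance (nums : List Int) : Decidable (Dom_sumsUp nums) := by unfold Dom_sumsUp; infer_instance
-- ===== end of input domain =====

-- B replaces A's nested index scans (with a list-membership dedup) by a single pass
-- with a seen-set and a precomputed value set; same return value on every input.

-- ===== PORT A =====
def sumsUp (nums : List Int) : Option (List (List Int)) :=
  if nums = [] then none
  else some ((PySem.List.pyRange 0 (nums.length : Int) 1).foldl (fun result i =>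
    (PySem.List.pyRange i (nums.length : Int) 1).foldl (fun result j =>
      if PySem.List.pyGetD nums i 0 = PySem.List.pyGetD nums j 0 then result
      else if PySem.List.pyGetD nums i 0 + PySem.List.pyGetD nums j 0 = 8 ∧
              PySem.List.sorted [PySem.List.pyGetD nums i 0, PySem.List.pyGetD nums j 0] (fun x => x) false ∉ result
        then result ++ [PySem.List.sorted [PySem.List.pyGetD nums i 0, PySem.List.pyGetD nums j 0] (fun x => x) false]
        else result) result) [])

-- ===== PORT B =====
def sumsUp_alt (nums : List Int) : Option (List (List Int)) :=
  if nums = [] then none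
  else
    let values : PySem.Set Int := PySem.Set.ofList nums
    some ((nums.foldl (fun (st : PySem.Set Int × List (List Int)) v =>
      if PySem.Set.contains st.1 v then st
      else
        let w := 8 - v
        (PySem.Set.add st.1 v,
         if w ≠ v ∧ PySem.Set.contains values w = true ∧ ¬ PySem.Set.contains st.1 w = true
           then st.2 ++ [if v < w then [v, w] else [w, v]]
           else st.2)) (PySem.Set.empty, [])).2)

-- ===== PRECONDITION & SPEC =====
def Spec_sumsUp (nums : List Int) (out : Option (List (List Int))) : Prop := out = sumsUp_alt nums
instance (nums : List Int) (out : Option (List (List Int))) : Decidable (Spec_sumsUp nums out) := by unfold Spec_sumsUp; infer_instance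

-- ===== CLAIM (what is proved, stated in full; the proofs are below) =====
def Claim_equal_sumsUp : Prop := ∀ (nums : List Int), Dom_sumsUp nums → Spec_sumsUp nums (sumsUp nums)

-- ===== LEMMAS AND PROOFS =====

/-- The one pair a value `v` can contribute: `sorted([v, 8 - v])`. -/
def pairOf (v : Int) : List Int := if v < 8 - v then [v, 8 - v] else [8 - v, v]

lemma sorted_pair (a b : Int) :
    PySem.List.sorted [a, b] (fun x => x) false = if b < a then [b, a] else [a, b] := by
  rw [PySem.List.sorted_eq_foldl_insertBy]
  simp [List.foldl, PySem.List.insertBy]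

lemma pairOf_eq_iff {u v : Int} (_hu : 8 - u ≠ u) (_hv : 8 - v ≠ v) :
    pairOf u = pairOf v ↔ (u = v ∨ u = 8 - v) := by
  unfold pairOf; split_ifs <;> simp <;> omega

/-- A's inner loop over an arbitrary list of indices, abstracted over the lookup `g`:
it appends `pairOf a` exactly when some index holds the complement and the pair is new. -/
lemma inner_fold (g : Int → Int) (a : Int) (js : List Int) (R : List (List Int)) :
    js.foldl (fun result j =>
      if a = g j then result
      else if a + g j = 8 ∧ PySem.List.sorted [a, g j] (fun x => x) false ∉ result
        then result ++ [PySem.List.sorted [a, g j] (fun x => x) false]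
        else result) R
    = if 8 - a ≠ a ∧ (∃ j ∈ js, g j = 8 - a) ∧ pairOf a ∉ R then R ++ [pairOf a] else R := by
  induction js generalizing R with
  | nil => simp
  | cons j js ih =>
    simp only [List.foldl_cons, List.exists_mem_cons_iff]
    by_cases h1 : a = g j
    · rw [if_pos h1, ih]
      by_cases h2 : (8:Int) - a = a
      · simp [h2]
      · have hgj : ¬ (g j = 8 - a) := by omega
        simp [hgj]
    · rw [if_neg h1]
      by_cases h3 : a + g j = 8
      · have hgj : g j = 8 - a := by omega
        have hne : (8:Int) - a ≠ a := by omega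
        have hpair : PySem.List.sorted [a, g j] (fun x => x) false = pairOf a := by
          rw [sorted_pair, hgj]; unfold pairOf; split_ifs <;> first | rfl | omega
        by_cases h4 : pairOf a ∈ R
        · rw [if_neg (by simp [hpair, h4]), ih]
          simp [h4]
        · rw [if_pos ⟨h3, by simp [hpair, h4]⟩, ih, hpair]
          simp [hne, hgj, h4]
      · rw [if_neg (fun h => h3 h.1), ih]
        have hgj : ¬ (g j = 8 - a) := by omega
        simp [hgj]

/-- A's outer loop rewritten as structural recursion over the suffixes of the list. -/
def aRec : List Int → List (List Int) → List (List Int)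
  | [], R => R
  | v :: rest, R =>
      aRec rest (if 8 - v ≠ v ∧ (8 - v) ∈ (v :: rest) ∧ pairOf v ∉ R then R ++ [pairOf v] else R)

lemma outer_aux (nums : List Int) :
    ∀ (m k : Nat) (R : List (List Int)), nums.length - k = m → k ≤ nums.length →
    (PySem.List.pyRange (k : Int) (nums.length : Int) 1).foldl (fun result i =>
      (PySem.List.pyRange i (nums.length : Int) 1).foldl (fun result j =>
        if PySem.List.pyGetD nums i 0 = PySem.List.pyGetD nums j 0 then result
        else if PySem.List.pyGetD nums i 0 + PySem.List.pyGetD nums j 0 = 8 ∧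
                PySem.List.sorted [PySem.List.pyGetD nums i 0, PySem.List.pyGetD nums j 0] (fun x => x) false ∉ result
          then result ++ [PySem.List.sorted [PySem.List.pyGetD nums i 0, PySem.List.pyGetD nums j 0] (fun x => x) false]
          else result) result) R
    = aRec (nums.drop k) R := by
  intro m
  induction m with
  | zero =>
    intro k R hm hk
    have hk' : k = nums.length := by omega
    rw [PySem.List.pyRange_one_eq_nil (by exact_mod_cast le_of_eq hk'.symm)]
    simp [hk', aRec]
  | succ m ih =>
    intro k R hm hk
    have hklt : k < nums.length := by omega
    have hm' : nums.length - (k + 1) = m := by omega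
    have hk2 : k + 1 ≤ nums.length := by omega
    rw [PySem.List.pyRange_one_cons (by exact_mod_cast hklt)]
    rw [List.foldl_cons]
    rw [inner_fold (fun j => PySem.List.pyGetD nums j 0) (PySem.List.pyGetD nums (k : Int) 0)]
    have hdrop : nums.drop k = nums[k] :: nums.drop (k + 1) := (List.getElem_cons_drop ..).symm
    have hv : PySem.List.pyGetD nums (k : Int) 0 = nums[k] := by
      rw [PySem.List.pyGetD_natCast]; exact List.getD_eq_getElem _ _ hklt
    have hmem : (∃ j ∈ PySem.List.pyRange (k : Int) (nums.length : Int) 1,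
        PySem.List.pyGetD nums j 0 = 8 - nums[k]) ↔ (8 - nums[k]) ∈ nums.drop k := by
      have h := PySem.List.map_pyGetD_pyRange' nums 0 (a := (k : Int)) (by positivity)
      rw [Int.toNat_natCast] at h
      rw [← h]
      simp [List.mem_map]
    have hcast : ((k : Int) + 1) = ((k + 1 : Nat) : Int) := by push_cast; ring
    rw [hv, hcast, ih (k + 1) _ hm' hk2, hdrop]
    simp only [aRec, hmem, hdrop]

/-- Bridge: A's suffix recursion equals B's one-pass fold, under the seen/result invariant. -/
lemma bridge (nums : List Int) (values : PySem.Set Int)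
    (hvals : ∀ x, PySem.Set.contains values x = true ↔ x ∈ nums) :
    ∀ (s pre : List Int) (seen : PySem.Set Int) (R : List (List Int)),
    nums = pre ++ s →
    (∀ x, PySem.Set.contains seen x = true ↔ x ∈ pre) →
    (∀ u : Int, 8 - u ≠ u → (pairOf u ∈ R ↔ u ∈ nums ∧ (8 - u) ∈ nums ∧ (u ∈ pre ∨ (8 - u) ∈ pre))) →
    aRec s R = (s.foldl (fun (st : PySem.Set Int × List (List Int)) v =>
      if PySem.Set.contains st.1 v then st
      else
        (PySem.Set.add st.1 v,
         if 8 - v ≠ v ∧ PySem.Set.contains values (8 - v) = true ∧ ¬ PySem.Set.contains st.1 (8 - v) = true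
           then st.2 ++ [if v < 8 - v then [v, 8 - v] else [8 - v, v]]
           else st.2)) (seen, R)).2 := by
  intro s
  induction s with
  | nil => intro pre seen R _ _ _; rfl
  | cons v rest ih =>
    intro pre seen R hpre hseen hR
    have hvnums : v ∈ nums := by rw [hpre]; simp
    simp only [aRec, List.foldl_cons]
    by_cases hvpre : v ∈ pre
    · -- v already seen: neither side changes anything
      rw [if_pos ((hseen v).2 hvpre)]
      have hno : ¬(8 - v ≠ v ∧ (8 - v) ∈ (v :: rest) ∧ pairOf v ∉ R) := by
        rintro ⟨h1, h2, h3⟩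
        have h2' : (8 - v) ∈ nums := by
          rcases List.mem_cons.1 h2 with h | h
          · exact absurd h h1
          · rw [hpre]; simp [h]
        exact h3 ((hR v h1).2 ⟨hvnums, h2', Or.inl hvpre⟩)
      rw [if_neg hno]
      refine ih (pre ++ [v]) seen R (by rw [hpre]; simp) ?_ ?_
      · intro x; rw [hseen x]; simp only [List.mem_append, List.mem_singleton]
        exact ⟨Or.inl, fun h => h.elim id (fun hx => hx ▸ hvpre)⟩
      · intro u hu; rw [hR u hu]; simp only [List.mem_append, List.mem_singleton]
        constructor
        · rintro ⟨h1, h2, h3⟩; exact ⟨h1, h2, by tauto⟩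
        · rintro ⟨h1, h2, h3⟩
          refine ⟨h1, h2, ?_⟩
          rcases h3 with (hm | hm) | (hm | hm)
          · exact Or.inl hm
          · exact Or.inl (hm ▸ hvpre)
          · exact Or.inr hm
          · exact Or.inr (hm ▸ hvpre)
    · -- v is a first occurrence
      rw [if_neg (fun h => hvpre ((hseen v).1 h))]
      have hpairv : (if v < 8 - v then [v, 8 - v] else [8 - v, v]) = pairOf v := rfl
      by_cases hc : 8 - v ≠ v ∧ PySem.Set.contains values (8 - v) = true ∧
          ¬ PySem.Set.contains seen (8 - v) = true
      · -- both sides append pairOf v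
        obtain ⟨h1, h2, h3⟩ := hc
        have hwnums : (8 - v) ∈ nums := (hvals _).1 h2
        have hwpre : (8 - v) ∉ pre := fun h => h3 ((hseen _).2 h)
        have hnotR : pairOf v ∉ R := fun h => by
          rcases ((hR v h1).1 h).2.2 with h' | h' <;> [exact hvpre h'; exact hwpre h']
        have hwsuf : (8 - v) ∈ (v :: rest) := by
          rw [hpre] at hwnums; rcases List.mem_append.1 hwnums with h | h
          · exact absurd h hwpre
          · exact h
        rw [if_pos ⟨h1, hwsuf, hnotR⟩, if_pos ⟨h1, h2, h3⟩, hpairv]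
        refine ih (pre ++ [v]) (PySem.Set.add seen v) (R ++ [pairOf v]) (by rw [hpre]; simp) ?_ ?_
        · intro x
          rw [PySem.Set.contains_iff, PySem.Set.mem_add, ← PySem.Set.contains_iff, hseen x]
          simp
        · intro u hu
          simp only [List.mem_append, List.mem_singleton]
          rw [hR u hu, pairOf_eq_iff hu h1]
          by_cases hcase : u = v ∨ u = 8 - v
          · have hrhs : u ∈ nums ∧ (8 - u) ∈ nums ∧ (u ∈ pre ++ [v] ∨ (8 - u) ∈ pre ++ [v]) := by
              rcases hcase with h | h <;> subst h
              · exact ⟨hvnums, hwnums, Or.inl (by simp)⟩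
              · refine ⟨hwnums, by simpa using hvnums, Or.inr (by simp)⟩
            simp only [List.mem_append, List.mem_singleton] at hrhs
            simp [hcase, hrhs]
          · push_neg at hcase
            have hne' : ¬(u = v ∨ u = 8 - v) := by push_neg; exact hcase
            simp only [hne', or_false]
            constructor
            · rintro ⟨h1', h2', h3'⟩; exact ⟨h1', h2', by tauto⟩
            · rintro ⟨h1', h2', h3'⟩
              refine ⟨h1', h2', ?_⟩
              rcases h3' with (hm | hm) | (hm | hm)
              · exact Or.inl hm
              · exact absurd hm hcase.1
              · exact Or.inr hm
              · exact absurd (by omega : u = 8 - v) hcase.2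
      · -- neither side appends
        have hno : ¬(8 - v ≠ v ∧ (8 - v) ∈ (v :: rest) ∧ pairOf v ∉ R) := by
          rintro ⟨h1, h2, h3⟩
          have h2' : (8 - v) ∈ nums := by
            rcases List.mem_cons.1 h2 with h | h
            · exact absurd h h1
            · rw [hpre]; simp [h]
          apply hc
          refine ⟨h1, (hvals _).2 h2', ?_⟩
          intro hsw
          exact h3 ((hR v h1).2 ⟨hvnums, h2', Or.inr ((hseen _).1 hsw)⟩)
        rw [if_neg hno, if_neg hc]
        refine ih (pre ++ [v]) (PySem.Set.add seen v) R (by rw [hpre]; simp) ?_ ?_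
        · intro x
          rw [PySem.Set.contains_iff, PySem.Set.mem_add, ← PySem.Set.contains_iff, hseen x]
          simp
        · intro u hu
          rw [hR u hu]
          simp only [List.mem_append, List.mem_singleton]
          by_cases hcase : u = v ∨ u = 8 - v
          · have h1 : (8 : Int) - v ≠ v := by rcases hcase with h | h <;> omega
            -- from ¬hc: the complement 8 - v is missing from nums, or already in pre
            have hor : (8 - v) ∉ nums ∨ (8 - v) ∈ pre := by
              by_contra hcon
              push_neg at hcon
              exact hc ⟨h1, (hvals _).2 hcon.1, fun h => hcon.2 ((hseen _).1 h)⟩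
            have humem : u ∈ nums ∧ (8 - u) ∈ nums ↔ (8 - v) ∈ nums := by
              rcases hcase with h | h <;> subst h
              · simp [hvnums]
              · have : (8 : Int) - (8 - v) = v := by ring
                rw [this]; simp [hvnums]
            rcases hor with hout | hinpre
            · have hrhs : ¬(u ∈ nums ∧ (8 - u) ∈ nums) := fun h => hout (humem.1 h)
              constructor
              · rintro ⟨ha, hb, _⟩; exact absurd ⟨ha, hb⟩ hrhs
              · rintro ⟨ha, hb, _⟩; exact absurd ⟨ha, hb⟩ hrhs
            · have hwn : (8 - v) ∈ nums := by rw [hpre]; simp [hinpre]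
              have hmm := humem.2 hwn
              have hold : u ∈ pre ∨ (8 - u) ∈ pre := by
                rcases hcase with h | h <;> subst h
                · exact Or.inr hinpre
                · exact Or.inl hinpre
              have hnew : (u ∈ pre ∨ u = v) ∨ ((8 - u) ∈ pre ∨ (8 - u) = v) := by tauto
              simp [hmm.1, hmm.2, hold, hnew]
          · push_neg at hcase
            constructor
            · rintro ⟨h1', h2', h3'⟩; exact ⟨h1', h2', by tauto⟩
            · rintro ⟨h1', h2', h3'⟩
              refine ⟨h1', h2', ?_⟩
              rcases h3' with (hm | hm) | (hm | hm)
              · exact Or.inl hm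
              · exact absurd hm hcase.1
              · exact Or.inr hm
              · exact absurd (by omega : u = 8 - v) hcase.2

-- ===== VERDICT (by name: the statement is the Claim_ definition above) =====
theorem sumsUp_spec : Claim_equal_sumsUp := by
  intro nums _
  unfold Spec_sumsUp sumsUp sumsUp_alt
  by_cases h : nums = []
  · simp [h]
  · rw [if_neg h, if_neg h]
    have hA := outer_aux nums nums.length 0 [] (by omega) (by omega)
    simp only [Nat.cast_zero, List.drop_zero] at hA
    rw [hA]
    have hB := bridge nums (PySem.Set.ofList nums)
      (fun x => by rw [PySem.Set.contains_iff, PySem.Set.mem_ofList])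
      nums [] PySem.Set.empty []
      (by simp)
      (by intro x; simp [PySem.Set.empty])
      (by intro u _; simp)
    rw [hB]
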